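-- pv_equiv track=rewrite | github.com/donalddellapietra/deepspace-game | tools/build_npc_blueprint.py | extract_part_grid
-- ===== SOURCE A (Python) =====
-- def extract_part_grid(part_voxels_dict):
--     """Convert sparse dict → dense grid + bounds."""
--     if not part_voxels_dict:
--         return None
--
--     coords = list(part_voxels_dict.keys())
--     xs = [c[0] for c in coords]
--     ys = [c[1] for c in coords]
--     zs = [c[2] for c in coords]
--
--     min_x, max_x = min(xs), max(xs)
--     min_y, max_y = min(ys), max(ys)
--     min_z, max_z = min(zs), max(zs)
--
--     sx = max_x - min_x + 1
--     sy = max_y - min_y + 1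
--     sz = max_z - min_z + 1
--
--     grid = [0] * (sx * sy * sz)
--     for (x, y, z), color in part_voxels_dict.items():
--         lx = x - min_x
--         ly = y - min_y
--         lz = z - min_z
--         grid[(lz * sy + ly) * sx + lx] = color
--
--     return {
--         "min": [min_x, min_y, min_z],
--         "size": [sx, sy, sz],
--         "voxels": grid,
--     }
-- ===== SOURCE B (Python) =====
-- def extract_part_grid(part_voxels_dict):
--     """Convert sparse dict -> dense grid + bounds.
--
--     One fused pass computes all six bounds; the grid is then built
--     SEQUENTIALLY: sort the voxels by their linear index and emit the grid
--     front-to-back as zero runs between consecutive occupied cells, instead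
--     of A's random-access scatter into a preallocated zero grid.
--     """
--     it = iter(part_voxels_dict)
--     try:
--         x0, y0, z0 = next(it)
--     except StopIteration:
--         return None
--     min_x = max_x = x0
--     min_y = max_y = y0
--     min_z = max_z = z0
--     for x, y, z in it:
--         if x < min_x:
--             min_x = x
--         elif x > max_x:
--             max_x = x
--         if y < min_y:
--             min_y = y
--         elif y > max_y:
--             max_y = y
--         if z < min_z:
--             min_z = z
--         elif z > max_z:
--             max_z = z
--
--     sx = max_x - min_x + 1
--     sy = max_y - min_y + 1
--     sz = max_z - min_z + 1
--
--     # voxel keys are distinct, hence so are the linear indices: sort by index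
--     cells = sorted(
--         ((((z - min_z) * sy + (y - min_y)) * sx + (x - min_x)), color)
--         for (x, y, z), color in part_voxels_dict.items())
--     grid = []
--     prev = 0
--     for idx, color in cells:
--         grid += [0] * (idx - prev)
--         grid.append(color)
--         prev = idx + 1
--     grid += [0] * (sx * sy * sz - prev)
--
--     return {
--         "min": [min_x, min_y, min_z],
--         "size": [sx, sy, sz],
--         "voxels": grid,
--     }
-- ===== Notes on version B (the rewrite author's own statement) =====
-- stated objective: alternative
-- what changed: B replaces A's three coordinate-list comprehensions plus six separate min/max scans with one fused compare-and-update bounds pass, and replaces A's random-access scatter into a preallocated zero grid with a sort-then-sequential-emit build: the voxels are sorted by their linear index and the grid is produced front-to-back as zero runs between consecutive occupied cells. Pre_ excludes association lists with duplicate coordinate keys, which cannot arise from a Python dict (dict keys are unique); on such representation-level duplicates A's last-write scatter and B's sorted emission could disagree.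
import Mathlib
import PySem

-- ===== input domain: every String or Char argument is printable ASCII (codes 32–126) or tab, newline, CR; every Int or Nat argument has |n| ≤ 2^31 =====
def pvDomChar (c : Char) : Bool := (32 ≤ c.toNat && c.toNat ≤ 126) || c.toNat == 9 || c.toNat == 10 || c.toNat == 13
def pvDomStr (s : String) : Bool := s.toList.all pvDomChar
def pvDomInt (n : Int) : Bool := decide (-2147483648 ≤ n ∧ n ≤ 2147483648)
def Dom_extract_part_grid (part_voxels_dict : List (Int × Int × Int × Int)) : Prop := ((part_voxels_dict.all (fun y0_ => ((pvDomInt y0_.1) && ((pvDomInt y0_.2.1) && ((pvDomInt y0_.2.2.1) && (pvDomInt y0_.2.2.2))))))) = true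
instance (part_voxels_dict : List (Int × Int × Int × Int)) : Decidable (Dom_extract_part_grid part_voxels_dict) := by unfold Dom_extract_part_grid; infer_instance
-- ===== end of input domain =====

-- B builds the grid sequentially instead of scattering: one fused compare-and-update pass
-- computes all six bounds, then the voxels are sorted by linear index and the grid is
-- emitted front-to-back as zero runs between consecutive occupied cells, instead of A's
-- coordinate comprehensions, six min/max scans and random-access scatter into a zero grid.


-- ===== PORT A =====
-- A's final lines: sizes, zero grid, scatter pass, result dict (the computed grid
-- index is always in range, so Python's grid[i] = color is exactly List.set there)
def pvAssemble (part_voxels_dict : List (Int × Int × Int × Int))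
    (min_x max_x min_y max_y min_z max_z : Int) : Option (List (String × List Int)) :=
  let sx := max_x - min_x + 1
  let sy := max_y - min_y + 1
  let sz := max_z - min_z + 1
  let grid := part_voxels_dict.foldl (fun g p =>
      let lx := p.1 - min_x
      let ly := p.2.1 - min_y
      let lz := p.2.2.1 - min_z
      g.set (((lz * sy + ly) * sx + lx).toNat) p.2.2.2)
    (List.replicate (sx * sy * sz).toNat 0)
  some [("min", [min_x, min_y, min_z]), ("size", [sx, sy, sz]), ("voxels", grid)]

def extract_part_grid (part_voxels_dict : List (Int × Int × Int × Int)) : Option (List (String × List Int)) :=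
  if part_voxels_dict.isEmpty then none else
  let coords := part_voxels_dict.map (fun p => (p.1, p.2.1, p.2.2.1))
  let xs := coords.map (fun c => c.1)
  let ys := coords.map (fun c => c.2.1)
  let zs := coords.map (fun c => c.2.2)
  -- min/max of a nonempty int list; .getD 0 never fires (guard above)
  let min_x := (PySem.List.min? xs (fun v => v)).getD 0
  let max_x := (PySem.List.max? xs (fun v => v)).getD 0
  let min_y := (PySem.List.min? ys (fun v => v)).getD 0
  let max_y := (PySem.List.max? ys (fun v => v)).getD 0
  let min_z := (PySem.List.min? zs (fun v => v)).getD 0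
  let max_z := (PySem.List.max? zs (fun v => v)).getD 0
  pvAssemble part_voxels_dict min_x max_x min_y max_y min_z max_z

-- ===== PORT B =====
-- one step of B's fused bounds loop over (min_x, max_x, min_y, max_y, min_z, max_z):
-- 'if c < mn: mn = c  elif c > mx: mx = c' per coordinate
def pvBStep (b : Int × Int × Int × Int × Int × Int) (p : Int × Int × Int × Int) :
    Int × Int × Int × Int × Int × Int :=
  (if p.1 < b.1 then p.1 else b.1,
   if p.1 < b.1 then b.2.1 else if p.1 > b.2.1 then p.1 else b.2.1,
   if p.2.1 < b.2.2.1 then p.2.1 else b.2.2.1,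
   if p.2.1 < b.2.2.1 then b.2.2.2.1 else if p.2.1 > b.2.2.2.1 then p.2.1 else b.2.2.2.1,
   if p.2.2.1 < b.2.2.2.2.1 then p.2.2.1 else b.2.2.2.2.1,
   if p.2.2.1 < b.2.2.2.2.1 then b.2.2.2.2.2 else if p.2.2.1 > b.2.2.2.2.2 then p.2.2.1 else b.2.2.2.2.2)

-- B's run-length emission loop: 'grid += [0]*(idx-prev); grid.append(color); prev = idx+1'
-- over the index-sorted cells, then the trailing zero run up to the box volume
def pvRunBuild (cells : List (Int × Int)) (total : Int) : List Int :=
  let st := cells.foldl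
    (fun st q => (st.1 ++ List.replicate (q.1 - st.2).toNat 0 ++ [q.2], q.1 + 1))
    (([] : List Int), (0 : Int))
  st.1 ++ List.replicate (total - st.2).toNat 0

def extract_part_grid_alt (part_voxels_dict : List (Int × Int × Int × Int)) : Option (List (String × List Int)) :=
  match part_voxels_dict with
  | [] => none
  | p0 :: rest =>
    let b := rest.foldl pvBStep (p0.1, p0.1, p0.2.1, p0.2.1, p0.2.2.1, p0.2.2.1)
    let min_x := b.1
    let max_x := b.2.1
    let min_y := b.2.2.1
    let max_y := b.2.2.2.1
    let min_z := b.2.2.2.2.1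
    let max_z := b.2.2.2.2.2
    let sx := max_x - min_x + 1
    let sy := max_y - min_y + 1
    let sz := max_z - min_z + 1
    let cells := PySem.List.sorted
      ((p0 :: rest).map (fun p =>
        (((p.2.2.1 - min_z) * sy + (p.2.1 - min_y)) * sx + (p.1 - min_x), p.2.2.2)))
      (fun q => q.1) false
    let grid := pvRunBuild cells (sx * sy * sz)
    some [("min", [min_x, min_y, min_z]), ("size", [sx, sy, sz]), ("voxels", grid)]

-- ===== PRECONDITION & SPEC =====
-- Pre_ excludes association lists with duplicate coordinate keys: such lists cannot
-- arise from a Python dict (dict keys are unique), and on these representation-level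
-- duplicates A's last-write scatter and B's sorted sequential emission are both accidental.
def Pre_extract_part_grid (part_voxels_dict : List (Int × Int × Int × Int)) : Prop :=
  (part_voxels_dict.map (fun p => (p.1, p.2.1, p.2.2.1))).Nodup
instance (part_voxels_dict : List (Int × Int × Int × Int)) : Decidable (Pre_extract_part_grid part_voxels_dict) := by unfold Pre_extract_part_grid; infer_instance

def pvWitness_extract_part_grid : (List (Int × Int × Int × Int)) := [(0, 0, 0, 5), (1, 0, 2, 7)]

def Spec_extract_part_grid (part_voxels_dict : List (Int × Int × Int × Int)) (out : Option (List (String × List Int))) : Prop := out = extract_part_grid_alt part_voxels_dict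
instance (part_voxels_dict : List (Int × Int × Int × Int)) (out : Option (List (String × List Int))) : Decidable (Spec_extract_part_grid part_voxels_dict out) := by unfold Spec_extract_part_grid; infer_instance

-- ===== CLAIM (what is proved, stated in full; the proofs are below) =====
def Claim_equal_extract_part_grid : Prop := ∀ (part_voxels_dict : List (Int × Int × Int × Int)), Dom_extract_part_grid part_voxels_dict → Pre_extract_part_grid part_voxels_dict → Spec_extract_part_grid part_voxels_dict (extract_part_grid part_voxels_dict)

-- ===== LEMMAS AND PROOFS =====

-- B's fused elif-style 6-tuple fold equals six independent min/max folds,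
-- under the invariant min ≤ max for each coordinate
theorem pvB_fold_eq (rest : List (Int × Int × Int × Int)) (a b c d e f : Int)
    (hab : a ≤ b) (hcd : c ≤ d) (hef : e ≤ f) :
    rest.foldl pvBStep (a, b, c, d, e, f)
      = (rest.foldl (fun m p => min m p.1) a,
         rest.foldl (fun m p => max m p.1) b,
         rest.foldl (fun m p => min m p.2.1) c,
         rest.foldl (fun m p => max m p.2.1) d,
         rest.foldl (fun m p => min m p.2.2.1) e,
         rest.foldl (fun m p => max m p.2.2.1) f) := by
  induction rest generalizing a b c d e f with
  | nil => rfl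
  | cons q t ih =>
    have step : pvBStep (a, b, c, d, e, f) q
        = (min a q.1, max b q.1, min c q.2.1, max d q.2.1, min e q.2.2.1, max f q.2.2.1) := by
      simp only [pvBStep, Prod.mk.injEq]
      refine ⟨?_, ?_, ?_, ?_, ?_, ?_⟩ <;>
        (simp only [min_def, max_def]; split_ifs <;> omega)
    simp only [List.foldl_cons, step]
    exact ih _ _ _ _ _ _
      (le_trans (min_le_left _ _) (le_trans hab (le_max_left _ _)))
      (le_trans (min_le_left _ _) (le_trans hcd (le_max_left _ _)))
      (le_trans (min_le_left _ _) (le_trans hef (le_max_left _ _)))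

-- the scatter loop preserves the grid length
theorem pvScatter_length (enc : (Int × Int × Int × Int) → Nat) (val : (Int × Int × Int × Int) → Int)
    (l : List (Int × Int × Int × Int)) :
    ∀ g : List Int, (l.foldl (fun g p => g.set (enc p) (val p)) g).length = g.length := by
  induction l with
  | nil => intro g; rfl
  | cons p t ih => intro g; rw [List.foldl_cons, ih, List.length_set]

-- scatter with distinct in-range indices: cell j holds the value of the unique item
-- whose index is j, else the initial content
theorem pvScatter_get? (enc : (Int × Int × Int × Int) → Nat) (val : (Int × Int × Int × Int) → Int)
    (j : Nat) (l : List (Int × Int × Int × Int)) :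
    ∀ g : List Int, (l.map enc).Nodup → (∀ p ∈ l, enc p < g.length) →
      (l.foldl (fun g p => g.set (enc p) (val p)) g)[j]? =
        (match l.find? (fun p => enc p == j) with
         | some p => some (val p)
         | none => g[j]?) := by
  induction l with
  | nil => intro g _ _; rfl
  | cons p t ih =>
    intro g hnd hin
    rw [List.map_cons] at hnd
    have hmem := (List.nodup_cons.mp hnd).1
    have hndt := (List.nodup_cons.mp hnd).2
    have hlen : (g.set (enc p) (val p)).length = g.length := List.length_set ..
    have ht := ih (g.set (enc p) (val p)) hndt
      (fun q hq => by rw [hlen]; exact hin q (List.mem_cons_of_mem _ hq))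
    rw [List.foldl_cons, List.find?_cons, ht]
    by_cases h : enc p = j
    · have hb : (enc p == j) = true := by simp [h]
      have hnone : t.find? (fun q => enc q == j) = none := by
        apply List.find?_eq_none.mpr
        intro q hq
        simp only [beq_iff_eq]
        intro hqj
        exact hmem (by rw [h, ← hqj]; exact List.mem_map_of_mem hq)
      rw [hnone, hb]
      subst h
      exact List.getElem?_set_self (hin p List.mem_cons_self)
    · have hb : (enc p == j) = false := by simp [h]
      rw [hb]
      cases t.find? (fun q => enc q == j) with
      | some q => rfl
      | none => exact List.getElem?_set_ne h

theorem pvFind?_congr {α : Type} (l : List α) (f g : α → Bool) (h : ∀ x ∈ l, f x = g x) :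
    l.find? f = l.find? g := by
  induction l with
  | nil => rfl
  | cons a t ih =>
    rw [List.find?_cons, List.find?_cons, h a List.mem_cons_self,
      ih (fun x hx => h x (List.mem_cons_of_mem a hx))]

-- first match by key is permutation-invariant when the keys are distinct
theorem pvFind?_perm (L M : List (Int × Int)) (hperm : L.Perm M)
    (hnd : (L.map Prod.fst).Nodup) (j : Int) :
    L.find? (fun q => q.1 == j) = M.find? (fun q => q.1 == j) := by
  have hinj := List.inj_on_of_nodup_map hnd
  cases hL : L.find? (fun q => q.1 == j) with
  | none =>
    rw [List.find?_eq_none] at hL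
    refine (List.find?_eq_none.mpr ?_).symm
    intro x hx
    exact hL x (hperm.mem_iff.mpr hx)
  | some a =>
    have ha := List.find?_some hL
    have haL := List.mem_of_find?_eq_some hL
    cases hM : M.find? (fun q => q.1 == j) with
    | none =>
      rw [List.find?_eq_none] at hM
      exact absurd ha (hM a (hperm.mem_iff.mp haL))
    | some b =>
      have hb := List.find?_some hM
      have hbL : b ∈ L := hperm.mem_iff.mpr (List.mem_of_find?_eq_some hM)
      have hab : a = b := hinj haL hbL (by
        simp only [beq_iff_eq] at ha hb; rw [ha, hb])
      rw [hab]

-- linearization (lz*sy + ly)*sx + lx = j is exactly the divmod decomposition of j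
theorem pvEnc_eq_iff (sx sy : Int) (hsx : 0 < sx) (hsy : 0 < sy) (lx ly lz j : Int)
    (hlx0 : 0 ≤ lx) (hlx : lx < sx) (hly0 : 0 ≤ ly) (hly : ly < sy) :
    (lz * sy + ly) * sx + lx = j ↔ (lx = j % sx ∧ ly = (j / sx) % sy ∧ lz = j / sx / sy) := by
  constructor
  · intro h
    subst h
    have hdivx : ((lz * sy + ly) * sx + lx) / sx = lz * sy + ly := by
      rw [show (lz * sy + ly) * sx + lx = lx + sx * (lz * sy + ly) by ring,
        Int.add_mul_ediv_left _ _ hsx.ne', Int.ediv_eq_zero_of_lt hlx0 hlx, zero_add]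
    refine ⟨?_, ?_, ?_⟩
    · rw [show (lz * sy + ly) * sx + lx = lx + sx * (lz * sy + ly) by ring,
        Int.add_mul_emod_self_left, Int.emod_eq_of_lt hlx0 hlx]
    · rw [hdivx, show lz * sy + ly = ly + sy * lz by ring,
        Int.add_mul_emod_self_left, Int.emod_eq_of_lt hly0 hly]
    · rw [hdivx, show lz * sy + ly = ly + sy * lz by ring,
        Int.add_mul_ediv_left _ _ hsy.ne', Int.ediv_eq_zero_of_lt hly0 hly, zero_add]
  · rintro ⟨h1, h2, h3⟩
    subst h1; subst h2; subst h3
    have hA := Int.mul_ediv_add_emod j sx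
    have hB := Int.mul_ediv_add_emod (j / sx) sy
    linear_combination sx * hB + hA

-- the linear index of an in-box cell lies in [0, sx*sy*sz)
theorem pvEnc_bounds (sx sy sz lx ly lz : Int) (hsx : 0 < sx) (hsy : 0 < sy)
    (hlx0 : 0 ≤ lx) (hlx : lx < sx) (hly0 : 0 ≤ ly) (hly : ly < sy)
    (hlz0 : 0 ≤ lz) (hlz : lz < sz) :
    0 ≤ (lz * sy + ly) * sx + lx ∧ (lz * sy + ly) * sx + lx < sx * sy * sz := by
  have h1 : lz * sy ≤ (sz - 1) * sy := mul_le_mul_of_nonneg_right (by omega) hsy.le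
  have h2 : (lz * sy + ly) * sx ≤ (sz * sy - 1) * sx :=
    mul_le_mul_of_nonneg_right (by nlinarith) hsx.le
  constructor
  · nlinarith [mul_nonneg hlz0 hsy.le, mul_nonneg (add_nonneg (mul_nonneg hlz0 hsy.le) hly0) hsx.le]
  · nlinarith [h2]

-- the run-length emission over a strictly index-sorted list of in-range cells
-- produces exactly the dense gather of those cells
theorem pvRun (N : Int) (s : List (Int × Int)) :
    ∀ (prev : Int) (g : List Int),
      s.Pairwise (fun a b => a.1 < b.1) → (∀ q ∈ s, prev ≤ q.1) → (∀ q ∈ s, q.1 < N) →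
      (s.foldl (fun st q => (st.1 ++ List.replicate (q.1 - st.2).toNat 0 ++ [q.2], q.1 + 1)) (g, prev)).1
        ++ List.replicate
            (N - (s.foldl (fun st q => (st.1 ++ List.replicate (q.1 - st.2).toNat 0 ++ [q.2], q.1 + 1)) (g, prev)).2).toNat 0
        = g ++ (PySem.List.pyRange prev N 1).map
            (fun j => ((s.find? (fun q => q.1 == j)).map (fun q => q.2)).getD 0) := by
  induction s with
  | nil =>
    intro prev g _ _ _
    simp [List.map_const', PySem.List.length_pyRange_one]
  | cons q t ih =>
    intro prev g hpw hlo hhi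
    have hqi : prev ≤ q.1 := hlo q List.mem_cons_self
    have hqN : q.1 < N := hhi q List.mem_cons_self
    have htlo : ∀ r ∈ t, q.1 + 1 ≤ r.1 := fun r hr => by
      have := List.rel_of_pairwise_cons hpw hr; omega
    have hthi : ∀ r ∈ t, r.1 < N := fun r hr => hhi r (List.mem_cons_of_mem q hr)
    simp only [List.foldl_cons]
    rw [ih (q.1 + 1) (g ++ List.replicate (q.1 - prev).toNat 0 ++ [q.2]) hpw.of_cons htlo hthi]
    rw [PySem.List.pyRange_one_append prev q.1 N hqi hqN.le, PySem.List.pyRange_one_cons hqN,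
      List.map_append, List.map_cons]
    have h0 : (PySem.List.pyRange prev q.1 1).map
        (fun j => (((q :: t).find? (fun r => r.1 == j)).map (fun r => r.2)).getD 0)
        = List.replicate (q.1 - prev).toNat 0 := by
      rw [List.map_congr_left (g := fun _ => (0 : Int)) (fun j hj => by
        have hjm := (PySem.List.mem_pyRange_one).mp hj
        rw [List.find?_cons_of_neg (by simp only [beq_iff_eq]; omega)]
        rw [List.find?_eq_none.mpr (fun r hr => by
          simp only [beq_iff_eq]; have := htlo r hr; omega)]
        rfl)]
      rw [List.map_const', PySem.List.length_pyRange_one]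
    have h1 : (((q :: t).find? (fun r => r.1 == q.1)).map (fun r => r.2)).getD 0 = q.2 := by
      rw [List.find?_cons_of_pos (by simp)]
      rfl
    have h2 : (PySem.List.pyRange (q.1 + 1) N 1).map
        (fun j => (((q :: t).find? (fun r => r.1 == j)).map (fun r => r.2)).getD 0)
        = (PySem.List.pyRange (q.1 + 1) N 1).map
            (fun j => ((t.find? (fun r => r.1 == j)).map (fun r => r.2)).getD 0) := by
      apply List.map_congr_left
      intro j hj
      have hjm := (PySem.List.mem_pyRange_one).mp hj
      rw [List.find?_cons_of_neg (by simp only [beq_iff_eq]; omega)]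
    rw [h0, h1, h2]
    simp [List.append_assoc]

-- the whole scatter/run-length equivalence, for any bounds enclosing all coordinates
theorem pvGather (l : List (Int × Int × Int × Int))
    (hnd : (l.map (fun p => (p.1, p.2.1, p.2.2.1))).Nodup)
    (mnx mxx mny mxy mnz mxz : Int)
    (hx : ∀ p ∈ l, mnx ≤ p.1 ∧ p.1 ≤ mxx)
    (hy : ∀ p ∈ l, mny ≤ p.2.1 ∧ p.2.1 ≤ mxy)
    (hz : ∀ p ∈ l, mnz ≤ p.2.2.1 ∧ p.2.2.1 ≤ mxz)
    (hne : l ≠ []) :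
    pvAssemble l mnx mxx mny mxy mnz mxz =
      some [("min", [mnx, mny, mnz]),
            ("size", [mxx - mnx + 1, mxy - mny + 1, mxz - mnz + 1]),
            ("voxels",
              pvRunBuild
                (PySem.List.sorted
                  (l.map (fun p =>
                    (((p.2.2.1 - mnz) * (mxy - mny + 1) + (p.2.1 - mny)) * (mxx - mnx + 1) + (p.1 - mnx), p.2.2.2)))
                  (fun q => q.1) false)
                ((mxx - mnx + 1) * (mxy - mny + 1) * (mxz - mnz + 1)))] := by
  obtain ⟨p1, hp1⟩ : ∃ p, p ∈ l := List.exists_mem_of_ne_nil l hne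
  have hsx0 : 0 < mxx - mnx + 1 := by have := hx p1 hp1; omega
  have hsy0 : 0 < mxy - mny + 1 := by have := hy p1 hp1; omega
  have hsz0 : 0 < mxz - mnz + 1 := by have := hz p1 hp1; omega
  simp only [pvAssemble]
  set sx := mxx - mnx + 1 with hsxe
  set sy := mxy - mny + 1 with hsye
  set sz := mxz - mnz + 1 with hsze
  -- per-item linear index bounds
  have hencB : ∀ p ∈ l, 0 ≤ ((p.2.2.1 - mnz) * sy + (p.2.1 - mny)) * sx + (p.1 - mnx) ∧
      ((p.2.2.1 - mnz) * sy + (p.2.1 - mny)) * sx + (p.1 - mnx) < sx * sy * sz := by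
    intro p hp
    exact pvEnc_bounds sx sy sz _ _ _ hsx0 hsy0
      (by have := hx p hp; omega) (by have := hx p hp; omega)
      (by have := hy p hp; omega) (by have := hy p hp; omega)
      (by have := hz p hp; omega) (by have := hz p hp; omega)
  refine congrArg some ?_
  refine List.cons_eq_cons.mpr ⟨rfl, List.cons_eq_cons.mpr ⟨rfl, List.cons_eq_cons.mpr ⟨?_, rfl⟩⟩⟩
  refine congrArg (fun g => ("voxels", g)) ?_
  have hlnd : l.Nodup := List.Nodup.of_map _ hnd
  have hKinj := List.inj_on_of_nodup_map hnd
  -- linear indices (as Int) are distinct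
  have hndEncInt : (l.map (fun p => ((p.2.2.1 - mnz) * sy + (p.2.1 - mny)) * sx + (p.1 - mnx))).Nodup := by
    refine (List.nodup_map_iff_inj_on hlnd).mpr ?_
    intro p hp q hq h
    refine hKinj hp hq ?_
    have hbp := hx p hp; have hcp := hy p hp; have hdp := hz p hp
    have hbq := hx q hq; have hcq := hy q hq; have hdq := hz q hq
    have h1 := (pvEnc_eq_iff sx sy hsx0 hsy0 (p.1 - mnx) (p.2.1 - mny) (p.2.2.1 - mnz)
      (((q.2.2.1 - mnz) * sy + (q.2.1 - mny)) * sx + (q.1 - mnx))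
      (by omega) (by omega) (by omega) (by omega)).mp h
    have h2 := (pvEnc_eq_iff sx sy hsx0 hsy0 (q.1 - mnx) (q.2.1 - mny) (q.2.2.1 - mnz)
      (((q.2.2.1 - mnz) * sy + (q.2.1 - mny)) * sx + (q.1 - mnx))
      (by omega) (by omega) (by omega) (by omega)).mp rfl
    obtain ⟨a1, a2, a3⟩ := h1
    obtain ⟨b1, b2, b3⟩ := h2
    simp only [Prod.mk.injEq]
    exact ⟨by omega, by omega, by omega⟩
  -- and so are their Nat images (all are nonnegative)
  have hndEnc : (l.map (fun p => (((p.2.2.1 - mnz) * sy + (p.2.1 - mny)) * sx + (p.1 - mnx)).toNat)).Nodup := by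
    have hcomp : (l.map (fun p => (((p.2.2.1 - mnz) * sy + (p.2.1 - mny)) * sx + (p.1 - mnx)).toNat))
        = (l.map (fun p => ((p.2.2.1 - mnz) * sy + (p.2.1 - mny)) * sx + (p.1 - mnx))).map Int.toNat := by
      simp [List.map_map, Function.comp_def]
    rw [hcomp]
    refine (List.nodup_map_iff_inj_on hndEncInt).mpr ?_
    intro a ha b hb hab
    rcases List.mem_map.mp ha with ⟨p, hp, rfl⟩
    rcases List.mem_map.mp hb with ⟨q, hq, rfl⟩
    have h1 := (hencB p hp).1
    have h2 := (hencB q hq).1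
    omega
  have hin : ∀ p ∈ l, (((p.2.2.1 - mnz) * sy + (p.2.1 - mny)) * sx + (p.1 - mnx)).toNat <
      (List.replicate (sx * sy * sz).toNat (0 : Int)).length := by
    intro p hp
    rw [List.length_replicate]
    have := hencB p hp
    omega
  -- the sorted cell list: a strictly index-increasing permutation of the cells
  have hperm := PySem.List.sorted_perm
    (l.map (fun p => (((p.2.2.1 - mnz) * sy + (p.2.1 - mny)) * sx + (p.1 - mnx), p.2.2.2)))
    (fun q => q.1) false
  have hndm : ((l.map (fun p => (((p.2.2.1 - mnz) * sy + (p.2.1 - mny)) * sx + (p.1 - mnx), p.2.2.2))).map Prod.fst).Nodup := by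
    simpa [List.map_map, Function.comp_def] using hndEncInt
  have hnds : ((PySem.List.sorted
      (l.map (fun p => (((p.2.2.1 - mnz) * sy + (p.2.1 - mny)) * sx + (p.1 - mnx), p.2.2.2)))
      (fun q => q.1) false).map Prod.fst).Nodup :=
    ((hperm.map Prod.fst).nodup_iff).mpr hndm
  have hpwlt : (PySem.List.sorted
      (l.map (fun p => (((p.2.2.1 - mnz) * sy + (p.2.1 - mny)) * sx + (p.1 - mnx), p.2.2.2)))
      (fun q => q.1) false).Pairwise (fun a b => a.1 < b.1) := by
    have hle := PySem.List.sorted_pairwise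
      (l.map (fun p => (((p.2.2.1 - mnz) * sy + (p.2.1 - mny)) * sx + (p.1 - mnx), p.2.2.2)))
      (fun q => q.1)
    have hne' := (List.pairwise_map).mp hnds
    exact (hle.and hne').imp (fun h => lt_of_le_of_ne h.1 h.2)
  have hsb : ∀ q ∈ (PySem.List.sorted
      (l.map (fun p => (((p.2.2.1 - mnz) * sy + (p.2.1 - mny)) * sx + (p.1 - mnx), p.2.2.2)))
      (fun q => q.1) false), 0 ≤ q.1 ∧ q.1 < sx * sy * sz := by
    intro q hq
    rcases List.mem_map.mp (hperm.subset hq) with ⟨p, hp, rfl⟩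
    exact hencB p hp
  -- run-length build = dense gather over the sorted cells, then over the raw cells
  have hrun : pvRunBuild (PySem.List.sorted
      (l.map (fun p => (((p.2.2.1 - mnz) * sy + (p.2.1 - mny)) * sx + (p.1 - mnx), p.2.2.2)))
      (fun q => q.1) false) (sx * sy * sz)
      = (PySem.List.pyRange 0 (sx * sy * sz) 1).map (fun j =>
          (((l.map (fun p => (((p.2.2.1 - mnz) * sy + (p.2.1 - mny)) * sx + (p.1 - mnx), p.2.2.2))).find?
            (fun q => q.1 == j)).map (fun q => q.2)).getD 0) := by
    simp only [pvRunBuild]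
    rw [pvRun (sx * sy * sz) _ 0 [] hpwlt (fun q hq => (hsb q hq).1) (fun q hq => (hsb q hq).2),
      List.nil_append]
    exact List.map_congr_left (fun j _ => by rw [pvFind?_perm _ _ hperm hnds j])
  rw [hrun]
  refine List.ext_getElem?_iff.mpr fun j => ?_
  by_cases hj : j < (sx * sy * sz).toNat
  · rw [pvScatter_get? _ _ j l _ hndEnc hin]
    rw [List.getElem?_map]
    have hpy : (PySem.List.pyRange 0 (sx * sy * sz) 1)[j]? = some ((j : Int)) := by
      rw [PySem.List.pyRange_one]
      simp [hj]
    rw [hpy]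
    simp only [Option.map_some]
    rw [List.find?_map]
    rw [pvFind?_congr l
      (fun p => ((((p.2.2.1 - mnz) * sy + (p.2.1 - mny)) * sx + (p.1 - mnx)).toNat == j))
      ((fun q => q.1 == (j : Int)) ∘ (fun p => (((p.2.2.1 - mnz) * sy + (p.2.1 - mny)) * sx + (p.1 - mnx), p.2.2.2)))
      (fun p hp => by
        apply Bool.eq_iff_iff.mpr
        simp only [Function.comp_apply, beq_iff_eq]
        have := (hencB p hp).1
        omega)]
    cases hfind : l.find?
        ((fun q => q.1 == (j : Int)) ∘ (fun p => (((p.2.2.1 - mnz) * sy + (p.2.1 - mny)) * sx + (p.1 - mnx), p.2.2.2))) with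
    | some p => simp
    | none => simp [hj]
  · have hL := List.getElem?_eq_none
      (l := l.foldl (fun g p =>
        g.set (((p.2.2.1 - mnz) * sy + (p.2.1 - mny)) * sx + (p.1 - mnx)).toNat p.2.2.2)
        (List.replicate (sx * sy * sz).toNat 0)) (i := j)
      (by rw [pvScatter_length, List.length_replicate]; omega)
    rw [hL, List.getElem?_eq_none (by simp [PySem.List.length_pyRange_one]; omega)]

theorem pvMain (l : List (Int × Int × Int × Int))
    (hnd : (l.map (fun p => (p.1, p.2.1, p.2.2.1))).Nodup) :
    extract_part_grid l = extract_part_grid_alt l := by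
  cases l with
  | nil => rfl
  | cons p0 rest =>
    simp only [extract_part_grid, extract_part_grid_alt, List.isEmpty_cons, Bool.false_eq_true,
      if_false, List.map_cons, PySem.List.min?_id_cons, PySem.List.max?_id_cons,
      Option.getD_some, List.foldl_map,
      pvB_fold_eq rest p0.1 p0.1 p0.2.1 p0.2.1 p0.2.2.1 p0.2.2.1 le_rfl le_rfl le_rfl]
    have hx : ∀ p ∈ p0 :: rest, List.foldl (fun m p => min m p.1) p0.1 rest ≤ p.1 ∧
        p.1 ≤ List.foldl (fun m p => max m p.1) p0.1 rest := by
      intro p hp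
      have hmin := PySem.List.foldl_min_le (rest.map (fun p => p.1)) p0.1
      have hmax := PySem.List.le_foldl_max (rest.map (fun p => p.1)) p0.1
      rw [List.foldl_map] at hmin hmax
      rcases List.mem_cons.mp hp with h | h
      · subst h; exact ⟨hmin.1, hmax.1⟩
      · exact ⟨hmin.2 _ (List.mem_map_of_mem h), hmax.2 _ (List.mem_map_of_mem h)⟩
    have hy : ∀ p ∈ p0 :: rest, List.foldl (fun m p => min m p.2.1) p0.2.1 rest ≤ p.2.1 ∧
        p.2.1 ≤ List.foldl (fun m p => max m p.2.1) p0.2.1 rest := by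
      intro p hp
      have hmin := PySem.List.foldl_min_le (rest.map (fun p => p.2.1)) p0.2.1
      have hmax := PySem.List.le_foldl_max (rest.map (fun p => p.2.1)) p0.2.1
      rw [List.foldl_map] at hmin hmax
      rcases List.mem_cons.mp hp with h | h
      · subst h; exact ⟨hmin.1, hmax.1⟩
      · exact ⟨hmin.2 _ (List.mem_map_of_mem h), hmax.2 _ (List.mem_map_of_mem h)⟩
    have hz : ∀ p ∈ p0 :: rest, List.foldl (fun m p => min m p.2.2.1) p0.2.2.1 rest ≤ p.2.2.1 ∧
        p.2.2.1 ≤ List.foldl (fun m p => max m p.2.2.1) p0.2.2.1 rest := by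
      intro p hp
      have hmin := PySem.List.foldl_min_le (rest.map (fun p => p.2.2.1)) p0.2.2.1
      have hmax := PySem.List.le_foldl_max (rest.map (fun p => p.2.2.1)) p0.2.2.1
      rw [List.foldl_map] at hmin hmax
      rcases List.mem_cons.mp hp with h | h
      · subst h; exact ⟨hmin.1, hmax.1⟩
      · exact ⟨hmin.2 _ (List.mem_map_of_mem h), hmax.2 _ (List.mem_map_of_mem h)⟩
    exact pvGather (p0 :: rest) hnd _ _ _ _ _ _ hx hy hz (List.cons_ne_nil p0 rest)

-- ===== VERDICT (by name: the statement is the Claim_ definition above) =====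
theorem extract_part_grid_spec : Claim_equal_extract_part_grid := by
  intro l _ hpre
  exact (pvMain l hpre).symm ▸ rfl
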